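-- pv_equiv track=rewrite | github.com/IT-F-30/test | wiersheak/extract_to_cstring.py | to_c_string
-- ===== SOURCE A (Python) =====
-- def to_c_string(data_bytes):
--     """
--     バイト列をC String形式に変換する
--     例: b'\x01\x02ABC' -> "\\001\\002ABC"
--     """
--     result = []
--     printable_ascii_codes = set(range(32, 127))
--
--     for byte_val in data_bytes:
--         char = chr(byte_val)
--         if char == '"':
--             result.append('\\"')
--         elif char == '\\':
--             result.append('\\\\')
--         elif byte_val in printable_ascii_codes:
--             result.append(char)
--         else:
--             result.append(f"\\{byte_val:03o}")
--
--     return '"' + "".join(result) + '"'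
-- ===== SOURCE B (Python) =====
-- # Run-based two-pointer scan: copy maximal runs of plain bytes wholesale,
-- # escape single bytes between runs (instead of branching per byte).
-- def to_c_string(data_bytes):
--     def plain(b):
--         return 32 <= b <= 126 and b != 34 and b != 92
--
--     parts = []
--     i, n = 0, len(data_bytes)
--     while i < n:
--         j = i
--         while j < n and plain(data_bytes[j]):
--             j += 1
--         parts.append(''.join(chr(b) for b in data_bytes[i:j]))
--         if j < n:
--             b = data_bytes[j]
--             if b == 34:
--                 parts.append('\\"')
--             elif b == 92:
--                 parts.append('\\\\')
--             else:
--                 parts.append('\\' + format(b, '03o'))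
--             j += 1
--         i = j
--     return '"' + ''.join(parts) + '"'
-- ===== Notes on version B (the rewrite author's own statement) =====
-- stated objective: alternative
-- what changed: B is a run-based two-pointer scan: it advances an index over each maximal run of plain printable bytes and appends that run wholesale, escaping only the single byte that ends a run, instead of A's uniform per-byte branch chain with a set-membership test.
import Mathlib
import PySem

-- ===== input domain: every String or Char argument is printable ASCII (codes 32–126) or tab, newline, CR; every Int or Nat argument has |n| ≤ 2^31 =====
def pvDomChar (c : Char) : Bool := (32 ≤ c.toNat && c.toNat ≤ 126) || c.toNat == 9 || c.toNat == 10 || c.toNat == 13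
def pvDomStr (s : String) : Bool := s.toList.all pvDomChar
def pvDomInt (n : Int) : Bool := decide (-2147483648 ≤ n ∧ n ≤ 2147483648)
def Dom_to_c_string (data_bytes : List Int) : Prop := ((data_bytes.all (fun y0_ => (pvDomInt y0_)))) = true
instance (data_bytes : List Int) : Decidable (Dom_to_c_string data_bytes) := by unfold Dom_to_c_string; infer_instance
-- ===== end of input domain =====

-- B replaces A's per-byte branch loop by a run-based two-pointer scan (maximal plain runs copied wholesale); same output wherever A returns.

-- ===== PORT A =====
-- chr(byte_val) is Char.ofNat byte_val.toNat (exact on 0 ≤ byte_val < 0x110000, which Pre_ gives);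
-- f"\{byte_val:03o}" is '\' :: zfill(octal digits) (exact for byte_val ≥ 0).
def to_c_string (data_bytes : List Int) : String :=
  let printable_ascii_codes := PySem.Set.ofList (PySem.List.pyRange 32 127 1)
  let result := data_bytes.foldl (fun acc byte_val =>
    let char := Char.ofNat byte_val.toNat
    if char = '"' then acc ++ [['\\', '"']]
    else if char = '\\' then acc ++ [['\\', '\\']]
    else if PySem.Set.contains printable_ascii_codes byte_val then acc ++ [[char]]
    else acc ++ ['\\' :: PySem.Chars.zfill (Nat.toDigits 8 byte_val.toNat) 3]) []
  String.ofList (['"'] ++ PySem.Chars.join [] result ++ ['"'])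

-- ===== PORT B =====
-- a byte that needs no escaping (plain printable)
def pvPlain (b : Int) : Bool := 32 ≤ b && b ≤ 126 && b != 34 && b != 92

-- the escape for the byte ending a run (b is not plain here)
def pvEscape (b : Int) : List Char :=
  if b = 34 then ['\\', '"']
  else if b = 92 then ['\\', '\\']
  else '\\' :: PySem.Chars.zfill (Nat.toDigits 8 b.toNat) 3

-- the two-pointer run scan: data_bytes[i:j] is the maximal plain run (takeWhile),
-- the loop continues on the remainder after the one escaped byte
def pvScan (l : List Int) : List Char :=
  match h : l.dropWhile pvPlain with
  | [] => (l.takeWhile pvPlain).map (fun b => Char.ofNat b.toNat)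
  | b :: tl =>
      (l.takeWhile pvPlain).map (fun b => Char.ofNat b.toNat) ++ pvEscape b ++ pvScan tl
termination_by l.length
decreasing_by
  have hle : (l.dropWhile pvPlain).length ≤ l.length := List.length_dropWhile_le _ _
  rw [h] at hle; simp at hle; omega

def to_c_string_alt (data_bytes : List Int) : String :=
  String.ofList (['"'] ++ pvScan data_bytes ++ ['"'])

-- ===== PRECONDITION & SPEC =====
-- Pre_ is exactly where the Python A returns: chr(byte_val) raises ValueError on negative values
-- and on values ≥ 0x110000.
def Pre_to_c_string (data_bytes : List Int) : Prop :=
  ∀ b ∈ data_bytes, 0 ≤ b ∧ b < 1114112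
instance (data_bytes : List Int) : Decidable (Pre_to_c_string data_bytes) := by
  unfold Pre_to_c_string; infer_instance
def pvWitness_to_c_string : List Int := [1, 2, 65, 34, 92, 126, 127, 255, 1000]
def Spec_to_c_string (data_bytes : List Int) (out : String) : Prop := out = to_c_string_alt data_bytes
instance (data_bytes : List Int) (out : String) : Decidable (Spec_to_c_string data_bytes out) := by unfold Spec_to_c_string; infer_instance

-- ===== CLAIM (what is proved, stated in full; the proofs are below) =====
def Claim_equal_to_c_string : Prop := ∀ (data_bytes : List Int), Dom_to_c_string data_bytes → Pre_to_c_string data_bytes → Spec_to_c_string data_bytes (to_c_string data_bytes)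

-- ===== LEMMAS AND PROOFS =====

-- the per-byte string A's loop appends for byte_val
def pvPieceA (byte_val : Int) : List Char :=
  let char := Char.ofNat byte_val.toNat
  if char = '"' then ['\\', '"']
  else if char = '\\' then ['\\', '\\']
  else if PySem.Set.contains (PySem.Set.ofList (PySem.List.pyRange 32 127 1)) byte_val then [char]
  else '\\' :: PySem.Chars.zfill (Nat.toDigits 8 byte_val.toNat) 3

theorem pvLoopA_eq_map (l : List Int) (acc : List (List Char)) :
    l.foldl (fun acc byte_val =>
      let char := Char.ofNat byte_val.toNat
      if char = '"' then acc ++ [['\\', '"']]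
      else if char = '\\' then acc ++ [['\\', '\\']]
      else if PySem.Set.contains (PySem.Set.ofList (PySem.List.pyRange 32 127 1)) byte_val then acc ++ [[char]]
      else acc ++ ['\\' :: PySem.Chars.zfill (Nat.toDigits 8 byte_val.toNat) 3]) acc
    = acc ++ l.map pvPieceA := by
  have h : (fun (acc : List (List Char)) (byte_val : Int) =>
      let char := Char.ofNat byte_val.toNat
      if char = '"' then acc ++ [['\\', '"']]
      else if char = '\\' then acc ++ [['\\', '\\']]
      else if PySem.Set.contains (PySem.Set.ofList (PySem.List.pyRange 32 127 1)) byte_val then acc ++ [[char]]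
      else acc ++ ['\\' :: PySem.Chars.zfill (Nat.toDigits 8 byte_val.toNat) 3])
      = fun acc byte_val => acc ++ [pvPieceA byte_val] := by
    funext acc byte_val
    simp only [pvPieceA]
    split_ifs <;> rfl
  rw [h, PySem.List.foldl_append_singleton_eq_map]

-- Char.ofNat reads back its code point (default NUL on invalid codes)
theorem pvOfNatToNat_valid (n : Nat) (h : n.isValidChar) : (Char.ofNat n).toNat = n := by
  simp [Char.ofNat, h, Char.toNat, Char.ofNatAux]

theorem pvOfNatToNat_invalid (n : Nat) (h : ¬ n.isValidChar) : (Char.ofNat n).toNat = 0 := by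
  simp [Char.ofNat, h, Char.toNat]

theorem pvEq34 (b : Int) (h0 : 0 ≤ b) : (Char.ofNat b.toNat = '"') ↔ b = 34 := by
  constructor
  · intro h
    have h' := congrArg Char.toNat h
    have h34 : ('"').toNat = 34 := by decide
    rw [h34] at h'
    by_cases hv : b.toNat.isValidChar
    · rw [pvOfNatToNat_valid _ hv] at h'; omega
    · rw [pvOfNatToNat_invalid _ hv] at h'; omega
  · intro h; subst h; decide

theorem pvEq92 (b : Int) (h0 : 0 ≤ b) : (Char.ofNat b.toNat = '\\') ↔ b = 92 := by
  constructor
  · intro h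
    have h' := congrArg Char.toNat h
    have h92 : ('\\').toNat = 92 := by decide
    rw [h92] at h'
    by_cases hv : b.toNat.isValidChar
    · rw [pvOfNatToNat_valid _ hv] at h'; omega
    · rw [pvOfNatToNat_invalid _ hv] at h'; omega
  · intro h; subst h; decide

theorem pvContains_eq (b : Int) :
    (PySem.Set.contains (PySem.Set.ofList (PySem.List.pyRange 32 127 1)) b = true) ↔ (32 ≤ b ∧ b < 127) := by
  rw [PySem.Set.contains_iff, PySem.Set.mem_ofList, PySem.List.mem_pyRange_one]

-- on a plain byte, A's piece is one literal character
theorem pvPieceA_plain (b : Int) (hp : pvPlain b = true) : pvPieceA b = [Char.ofNat b.toNat] := by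
  simp [pvPlain] at hp
  obtain ⟨⟨⟨h32, h126⟩, h34⟩, h92⟩ := hp
  have h0 : 0 ≤ b := by omega
  unfold pvPieceA
  rw [if_neg (fun h => h34 ((pvEq34 b h0).mp h)),
      if_neg (fun h => h92 ((pvEq92 b h0).mp h)),
      if_pos ((pvContains_eq b).mpr ⟨h32, by omega⟩)]

-- on a non-plain byte (inside Pre_), A's piece is B's escape
theorem pvPieceA_escape (b : Int) (h0 : 0 ≤ b) (hp : pvPlain b = false) :
    pvPieceA b = pvEscape b := by
  unfold pvPieceA pvEscape
  by_cases h34 : b = 34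
  · subst h34; decide
  · by_cases h92 : b = 92
    · subst h92; decide
    · have hnp : ¬ (32 ≤ b ∧ b < 127) := by
        intro hr
        have ht : pvPlain b = true := by simp [pvPlain]; omega
        rw [ht] at hp; exact Bool.noConfusion hp
      rw [if_neg (fun h => h34 ((pvEq34 b h0).mp h)),
          if_neg (fun h => h92 ((pvEq92 b h0).mp h)),
          if_neg (fun h => hnp ((pvContains_eq b).mp h)),
          if_neg h34, if_neg h92]

-- flattening singleton pieces is the plain map
theorem pvFlattenMapSingle {α β : Type} (f : α → β) (l : List α) :
    (l.map (fun a => [f a])).flatten = l.map f := by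
  induction l with
  | nil => rfl
  | cons x xs ih => simp [ih]

-- the run scan equals the flattened per-byte map, wherever Pre_ holds
theorem pvScan_eq_flatten (l : List Int) (hpre : ∀ b ∈ l, 0 ≤ b ∧ b < 1114112) :
    pvScan l = (l.map pvPieceA).flatten := by
  rw [pvScan]
  split
  · rename_i h
    have hl : l = l.takeWhile pvPlain := by
      conv_lhs => rw [← List.takeWhile_append_dropWhile (p := pvPlain) (l := l)]
      rw [h, List.append_nil]
    rw [← hl]
    have : ∀ b ∈ l, pvPieceA b = [Char.ofNat b.toNat] := by
      intro b hb
      have hp : pvPlain b = true := by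
        have := List.dropWhile_eq_nil_iff (p := pvPlain) (l := l) |>.mp h
        exact this b hb
      exact pvPieceA_plain b hp
    rw [List.map_congr_left this, pvFlattenMapSingle]
  · rename_i b tl h
    have hsub : (l.dropWhile pvPlain).Sublist l := List.dropWhile_sublist _
    rw [h] at hsub
    have hmemtl : ∀ x ∈ tl, x ∈ l := fun x hx => hsub.mem (by simp [hx])
    have hmemb : b ∈ l := hsub.mem (by simp)
    have ih := pvScan_eq_flatten tl (fun x hx => hpre x (hmemtl x hx))
    rw [ih]
    conv_rhs => rw [← List.takeWhile_append_dropWhile (p := pvPlain) (l := l), h]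
    rw [List.map_append, List.flatten_append, List.map_cons, List.flatten_cons]
    have hplains : ∀ x ∈ l.takeWhile pvPlain, pvPieceA x = [Char.ofNat x.toNat] :=
      fun x hx => pvPieceA_plain x (List.mem_takeWhile_imp hx)
    have hbesc : pvPieceA b = pvEscape b := by
      apply pvPieceA_escape b (hpre b hmemb).1
      have := List.head?_dropWhile_not (p := pvPlain) (l := l)
      rw [h] at this; simpa using this
    rw [hbesc, List.map_congr_left hplains, pvFlattenMapSingle, List.append_assoc]
termination_by l.length
decreasing_by
  rename_i heq
  have hle : (l.dropWhile pvPlain).length ≤ l.length := List.length_dropWhile_le _ _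
  rw [heq] at hle; simp at hle; omega

theorem pvJoin_nil_eq_flatten (xs : List (List Char)) : PySem.Chars.join [] xs = xs.flatten := by
  induction xs with
  | nil => rfl
  | cons x xs ih =>
    cases xs with
    | nil => simp [PySem.Chars.join, List.intercalate, List.intersperse]
    | cons y ys =>
      rw [PySem.Chars.join_cons_cons, ih]
      simp

-- ===== VERDICT (by name: the statement is the Claim_ definition above) =====
theorem to_c_string_spec : Claim_equal_to_c_string := by
  intro data_bytes _ hpre
  unfold Spec_to_c_string to_c_string to_c_string_alt
  simp only [pvLoopA_eq_map, List.nil_append, pvJoin_nil_eq_flatten,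
    pvScan_eq_flatten data_bytes hpre]
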